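-- pv_equiv track=rewrite | github.com/michavardy/snap | utils/parser_utils.py | clean_regex_input
-- ===== SOURCE A (Python) =====
-- def clean_regex_input(string:str) -> str:
--     replace_dict = {
--         "{":"",
--         "}":"",
--         "\"":"",
--         "\n":"",
--         }
--     for key, value in replace_dict.items():
--         string = string.replace(key, value)
--     string = string.strip()
--     return string
-- ===== SOURCE B (Python) =====
-- def clean_regex_input(string: str) -> str:
--     drop = {'{', '}', '"', '\n'}
--     return ''.join(ch for ch in string if ch not in drop).strip()
-- ===== Notes on version B (the rewrite author's own statement) =====
-- stated objective: simpler
-- what changed: Replaces A's four sequential str.replace scans (each building an intermediate string) with a single membership-filtered pass over the characters followed by strip.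
import Mathlib
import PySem

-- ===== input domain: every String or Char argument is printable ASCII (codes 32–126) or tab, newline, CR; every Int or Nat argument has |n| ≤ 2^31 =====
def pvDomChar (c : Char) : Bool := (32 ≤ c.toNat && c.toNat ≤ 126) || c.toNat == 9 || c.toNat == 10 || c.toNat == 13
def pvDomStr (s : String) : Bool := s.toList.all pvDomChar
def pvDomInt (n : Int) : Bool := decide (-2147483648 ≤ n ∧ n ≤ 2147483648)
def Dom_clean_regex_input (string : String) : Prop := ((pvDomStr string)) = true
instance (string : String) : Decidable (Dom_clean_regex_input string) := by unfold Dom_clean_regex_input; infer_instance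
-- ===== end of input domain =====

-- B replaces A's four sequential str.replace scans with one membership-filtered pass, then strip (objective: simpler).

-- ===== PORT A =====
def clean_regex_input (string : String) : String :=
  let replace_dict : PySem.Dict String String :=
    ((((PySem.Dict.empty).insert "{" "").insert "}" "").insert "\"" "").insert "\n" ""
  let string := replace_dict.items.foldl (fun s kv => PySem.Str.replace s kv.1 kv.2) string
  PySem.Str.strip string

-- ===== PORT B =====
def clean_regex_input_alt (string : String) : String :=
  PySem.Str.strip (String.ofList (string.toList.filter
    (fun ch => !(ch == '{' || ch == '}' || ch == '"' || ch == '\n'))))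

-- ===== PRECONDITION & SPEC =====
def Spec_clean_regex_input (string : String) (out : String) : Prop := out = clean_regex_input_alt string
instance (string : String) (out : String) : Decidable (Spec_clean_regex_input string out) := by unfold Spec_clean_regex_input; infer_instance

-- ===== CLAIM (what is proved, stated in full; the proofs are below) =====
def Claim_equal_clean_regex_input : Prop := ∀ (string : String), Dom_clean_regex_input string → Spec_clean_regex_input string (clean_regex_input string)

-- ===== LEMMAS AND PROOFS =====

-- replace.go with a single-char pattern and empty replacement filters that char out
theorem pv_go_filter (ch : Char) : ∀ (l : List Char) (fuel : Nat) (acc : List Char),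
    l.length ≤ fuel →
    PySem.Chars.replace.go [ch] [] fuel l acc = acc.reverse ++ l.filter (· ≠ ch) := by
  intro l
  induction l with
  | nil =>
    intro fuel acc _
    cases fuel <;> simp [PySem.Chars.replace.go]
  | cons c t ih =>
    intro fuel acc h
    cases fuel with
    | zero => simp at h
    | succ f =>
      simp only [PySem.Chars.replace.go]
      by_cases hc : c = ch
      · subst hc
        have hp : List.isPrefixOf [c] (c :: t) = true := by simp [List.isPrefixOf]
        simp [hp, ih f acc (by simpa using h)]
      · rw [if_neg (by simp [List.isPrefixOf]; exact fun x => hc x.symm)]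
        rw [ih f (c :: acc) (by simpa using h)]
        simp [hc]

theorem pv_replace_single (ch : Char) (s : List Char) :
    PySem.Chars.replace s [ch] [] = s.filter (· ≠ ch) := by
  rw [PySem.Chars.replace]
  simp only [List.isEmpty_cons, if_false, Bool.false_eq_true]
  exact pv_go_filter ch s s.length [] le_rfl

-- the four successive single-char removals collapse to one filter
theorem pv_chain (cs : List Char) :
    PySem.Chars.replace (PySem.Chars.replace (PySem.Chars.replace
      (PySem.Chars.replace cs ['{'] []) ['}'] []) ['"'] []) ['\n'] []
    = cs.filter (fun ch => !(ch == '{' || ch == '}' || ch == '"' || ch == '\n')) := by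
  simp only [pv_replace_single, List.filter_filter]
  refine List.filter_congr ?_
  intro a _
  by_cases h1 : a = '{' <;> by_cases h2 : a = '}' <;> by_cases h3 : a = '"' <;>
    by_cases h4 : a = '\n' <;> simp [h1, h2, h3, h4]

theorem clean_regex_input_spec : Claim_equal_clean_regex_input := by
  intro s _
  unfold Spec_clean_regex_input clean_regex_input clean_regex_input_alt
  have hitems : ((((((PySem.Dict.empty).insert "{" "").insert "}" "").insert "\"" "").insert "\n" "")
      : PySem.Dict String String).items
      = [("{", ""), ("}", ""), ("\"", ""), ("\n", "")] := by decide
  simp only [hitems, List.foldl]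
  refine congrArg PySem.Str.strip (String.toList_inj.mp ?_)
  have h1 : ("{" : String).toList = ['{'] := rfl
  have h2 : ("}" : String).toList = ['}'] := rfl
  have h3 : ("\"" : String).toList = ['"'] := rfl
  have h4 : ("\n" : String).toList = ['\n'] := rfl
  have h0 : ("" : String).toList = [] := rfl
  simp only [PySem.Str.toList_replace, h1, h2, h3, h4, h0, String.toList_ofList]
  exact pv_chain s.toList
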